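-- pv_equiv track=rewrite | github.com/nguyentrungduc9310/azure-screenshoot-to-code | services/api-gateway/app/ai/optimization.py | _prioritize_suggestions
-- ===== SOURCE A (Python) =====
-- from typing import Dict, List, Optional, Any, Set, Tuple
--
-- def _prioritize_suggestions(suggestions: List[str],
--                           context: Dict[str, Any]) -> List[str]:
--     """Prioritize suggestions based on importance and context"""
--     priority_keywords = {
--         'security': 10,
--         'performance': 9,
--         'accessibility': 8,
--         'best practices': 7,
--         'optimization': 6,
--         'responsive': 5,
--         'maintainability': 4
--     }
--
--     scored_suggestions = []
--     for suggestion in suggestions: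
--         score = 0
--         suggestion_lower = suggestion.lower()
--
--         for keyword, points in priority_keywords.items():
--             if keyword in suggestion_lower:
--                 score += points
--
--         scored_suggestions.append((score, suggestion))
--
--     # Sort by score (descending) and return suggestions
--     scored_suggestions.sort(key=lambda x: x[0], reverse=True)
--     return [suggestion for _, suggestion in scored_suggestions]
-- ===== SOURCE B (Python) =====
-- def _prioritize_suggestions(suggestions, context):
--     """Prioritize suggestions based on importance and context"""
--     priority_keywords = {
--         'security': 10,
--         'performance': 9,
--         'accessibility': 8,
--         'best practices': 7,
--         'optimization': 6,
--         'responsive': 5,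
--         'maintainability': 4
--     }
--
--     def _score(suggestion):
--         s = suggestion.lower()
--         total = 0
--         for keyword, points in priority_keywords.items():
--             if keyword in s:
--                 total += points
--         return total
--
--     # group suggestions by score, preserving input order within each group
--     buckets = {}
--     for suggestion in suggestions:
--         sc = _score(suggestion)
--         buckets.setdefault(sc, []).append(suggestion)
--
--     # emit groups by descending score
--     result = []
--     for sc in sorted(buckets, reverse=True):
--         result.extend(buckets[sc])
--     return result
-- ===== Notes on version B (the rewrite author's own statement) =====
-- stated objective: alternative
-- what changed: Replaces the comparison sort of (score, suggestion) tuples with a score->bucket grouping dict built in one pass and emitted by iterating the distinct scores in descending order, ties kept in input order.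
import Mathlib
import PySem

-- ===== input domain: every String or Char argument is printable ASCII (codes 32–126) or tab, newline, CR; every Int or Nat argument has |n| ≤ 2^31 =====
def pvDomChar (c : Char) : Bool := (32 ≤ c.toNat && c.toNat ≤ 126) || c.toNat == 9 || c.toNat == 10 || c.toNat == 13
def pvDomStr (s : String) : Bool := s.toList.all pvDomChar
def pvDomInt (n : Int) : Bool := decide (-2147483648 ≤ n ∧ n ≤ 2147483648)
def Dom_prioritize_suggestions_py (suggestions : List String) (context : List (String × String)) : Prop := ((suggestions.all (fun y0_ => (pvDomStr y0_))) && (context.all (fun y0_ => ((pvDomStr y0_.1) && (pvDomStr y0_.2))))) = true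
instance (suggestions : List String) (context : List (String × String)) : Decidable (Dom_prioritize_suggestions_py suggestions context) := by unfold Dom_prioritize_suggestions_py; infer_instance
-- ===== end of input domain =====

-- B replaces A's comparison sort of (score, suggestion) tuples by a score→bucket grouping
-- dict emitted in descending key order (alternative decomposition; same results, ties in input order).

-- the priority_keywords table (a dict literal iterated in insertion order in both programs)
def pvKeywords : List (String × Int) :=
  [("security", 10), ("performance", 9), ("accessibility", 8), ("best practices", 7),
   ("optimization", 6), ("responsive", 5), ("maintainability", 4)]

-- ===== PORT A =====
def prioritize_suggestions_py (suggestions : List String) (context : List (String × String)) : List String :=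
  let scored_suggestions := suggestions.foldl (fun acc suggestion =>
      let suggestion_lower := PySem.Str.lower suggestion
      let score := pvKeywords.foldl (fun score kp =>
          if PySem.Str.isIn kp.1 suggestion_lower then score + kp.2 else score) 0
      acc ++ [(score, suggestion)]) ([] : List (Int × String))
  (PySem.List.sorted scored_suggestions (fun x => x.1) true).map (fun x => x.2)

-- ===== PORT B =====
-- _score helper of Source B
def pvScore (suggestion : String) : Int :=
  let s := PySem.Str.lower suggestion
  pvKeywords.foldl (fun total kp => if PySem.Str.isIn kp.1 s then total + kp.2 else total) 0

def prioritize_suggestions_py_alt (suggestions : List String) (context : List (String × String)) : List String :=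
  -- buckets.setdefault(sc, []).append(suggestion): append suggestion to its score bucket
  let buckets := suggestions.foldl
      (fun d suggestion => d.modify (pvScore suggestion) [] (fun b => b ++ [suggestion]))
      (PySem.Dict.empty : PySem.Dict Int (List String))
  -- emit groups by descending score
  (PySem.List.sorted buckets.keys (fun k => k) true).foldl (fun result sc => result ++ buckets.getD sc []) []

-- ===== PRECONDITION & SPEC =====
def Spec_prioritize_suggestions_py (suggestions : List String) (context : List (String × String)) (out : List String) : Prop := out = prioritize_suggestions_py_alt suggestions context
instance (suggestions : List String) (context : List (String × String)) (out : List String) : Decidable (Spec_prioritize_suggestions_py suggestions context out) := by unfold Spec_prioritize_suggestions_py; infer_instance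

-- ===== CLAIM (what is proved, stated in full; the proofs are below) =====
def Claim_equal_prioritize_suggestions_py : Prop := ∀ (suggestions : List String) (context : List (String × String)), Dom_prioritize_suggestions_py suggestions context → Spec_prioritize_suggestions_py suggestions context (prioritize_suggestions_py suggestions context)

-- ===== LEMMAS AND PROOFS =====

-- comparison used by the stable descending insertion sort on pairs / on keys
def pvBeforeP (a b : Int × String) : Bool := decide (b.1 < a.1)
def pvBeforeK (a b : Int) : Bool := decide (b < a)

-- concatenation of the score buckets of ps, in the key order ks
def pvEmit (ks : List Int) (ps : List (Int × String)) : List (Int × String) :=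
  ks.flatMap (fun k => ps.filter (fun p => p.1 == k))

theorem pvInsertBy_cons {α : Type} (before : α → α → Bool) (x y : α) (ys : List α) :
    PySem.List.insertBy before x (y :: ys)
      = if before x y then x :: y :: ys else y :: PySem.List.insertBy before x ys := rfl

theorem pvInsertBy_all_before {α : Type} (before : α → α → Bool) (x : α) (l : List α)
    (h : ∀ y ∈ l, before x y = true) : PySem.List.insertBy before x l = x :: l := by
  cases l with
  | nil => rfl
  | cons y ys => rw [pvInsertBy_cons, h y (by simp)]; simp

theorem pvInsertBy_append {α : Type} (before : α → α → Bool) (x : α) (l1 l2 : List α)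
    (h : ∀ y ∈ l1, before x y = false) :
    PySem.List.insertBy before x (l1 ++ l2) = l1 ++ PySem.List.insertBy before x l2 := by
  induction l1 with
  | nil => rfl
  | cons y ys ih =>
    rw [List.cons_append, pvInsertBy_cons, h y (by simp)]
    simp [ih (fun z hz => h z (by simp [hz]))]

theorem pvMem_emit_key (ks : List Int) (ps : List (Int × String)) (y : Int × String)
    (h : y ∈ pvEmit ks ps) : y.1 ∈ ks := by
  simp only [pvEmit, List.mem_flatMap, List.mem_filter] at h
  obtain ⟨k, hk, _, he⟩ := h
  simpa [show y.1 = k from by simpa using he] using hk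

theorem pvEmit_append_not_mem (ks : List Int) (ps : List (Int × String)) (x : Int × String)
    (h : x.1 ∉ ks) : pvEmit ks (ps ++ [x]) = pvEmit ks ps := by
  unfold pvEmit
  apply List.flatMap_congr
  intro k hk
  have : (x.1 == k) = false := by
    simp only [beq_eq_false_iff_ne]; rintro rfl; exact h hk
  simp [List.filter_append, this]

theorem pvL2a (ks : List Int) (ps : List (Int × String)) (x : Int × String)
    (hp : ks.Pairwise (fun a b => b < a)) (hm : x.1 ∈ ks) :
    PySem.List.insertBy pvBeforeP x (pvEmit ks ps) = pvEmit ks (ps ++ [x]) := by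
  induction ks with
  | nil => cases hm
  | cons k ks ih =>
    have hlt : ∀ a ∈ ks, a < k := by
      intro a ha; exact (List.pairwise_cons.mp hp).1 a ha
    have hp' := (List.pairwise_cons.mp hp).2
    by_cases hk : x.1 = k
    · -- x belongs to the head bucket: goes after it, before everything deeper
      have hfilt : ∀ y ∈ ps.filter (fun p => p.1 == k), pvBeforeP x y = false := by
        intro y hy
        have : y.1 = k := by simpa using (List.mem_filter.mp hy).2
        simp [pvBeforeP, this, hk]
      have hrest : ∀ y ∈ pvEmit ks ps, pvBeforeP x y = true := by
        intro y hy
        have := hlt y.1 (pvMem_emit_key ks ps y hy)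
        simp [pvBeforeP, hk]; omega
      have hnot : x.1 ∉ ks := by rw [hk]; intro h; exact lt_irrefl k (hlt k h)
      show PySem.List.insertBy pvBeforeP x
          (ps.filter (fun p => p.1 == k) ++ pvEmit ks ps) = _
      rw [pvInsertBy_append _ _ _ _ hfilt, pvInsertBy_all_before _ _ _ hrest]
      show _ = (ps ++ [x]).filter (fun p => p.1 == k) ++ pvEmit ks (ps ++ [x])
      rw [pvEmit_append_not_mem ks ps x hnot, List.filter_append]
      simp [hk]
    · have hm' : x.1 ∈ ks := by cases hm with
        | head => exact absurd rfl hk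
        | tail _ h => exact h
      have hfilt : ∀ y ∈ ps.filter (fun p => p.1 == k), pvBeforeP x y = false := by
        intro y hy
        have hy1 : y.1 = k := by simpa using (List.mem_filter.mp hy).2
        have : x.1 < k := hlt _ hm'
        simp [pvBeforeP, hy1]; omega
      show PySem.List.insertBy pvBeforeP x
          (ps.filter (fun p => p.1 == k) ++ pvEmit ks ps) = _
      rw [pvInsertBy_append _ _ _ _ hfilt, ih hp' hm']
      show _ = (ps ++ [x]).filter (fun p => p.1 == k) ++ pvEmit ks (ps ++ [x])
      have : (x.1 == k) = false := by simp [hk]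
      simp [List.filter_append, this]

theorem pvL2b (ks : List Int) (ps : List (Int × String)) (x : Int × String)
    (hp : ks.Pairwise (fun a b => b < a)) (hm : x.1 ∉ ks)
    (hb : ps.filter (fun p => p.1 == x.1) = []) :
    PySem.List.insertBy pvBeforeP x (pvEmit ks ps)
      = pvEmit (PySem.List.insertBy pvBeforeK x.1 ks) (ps ++ [x]) := by
  induction ks with
  | nil =>
    show PySem.List.insertBy pvBeforeP x [] = pvEmit [x.1] (ps ++ [x])
    simp [PySem.List.insertBy, pvEmit, List.filter_append, hb]
  | cons k ks ih =>
    have hlt : ∀ a ∈ ks, a < k := by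
      intro a ha; exact (List.pairwise_cons.mp hp).1 a ha
    have hp' := (List.pairwise_cons.mp hp).2
    have hxk : x.1 ≠ k := by intro h; exact hm (h ▸ List.mem_cons_self)
    have hm' : x.1 ∉ ks := fun h => hm (List.mem_cons_of_mem _ h)
    by_cases hgt : k < x.1
    · -- x's (new) score is largest: new bucket [x] goes first
      have hall : ∀ y ∈ pvEmit (k :: ks) ps, pvBeforeP x y = true := by
        intro y hy
        have hle : y.1 ≤ k := by
          rcases List.mem_cons.mp (pvMem_emit_key _ _ _ hy) with h | h
          · exact le_of_eq h
          · exact (hlt _ h).le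
        simp [pvBeforeP]; omega
      rw [pvInsertBy_all_before _ _ _ hall]
      have hkeys : PySem.List.insertBy pvBeforeK x.1 (k :: ks) = x.1 :: k :: ks := by
        rw [pvInsertBy_cons]; simp [pvBeforeK, hgt]
      rw [hkeys]
      show x :: pvEmit (k :: ks) ps
          = (ps ++ [x]).filter (fun p => p.1 == x.1) ++ pvEmit (k :: ks) (ps ++ [x])
      rw [pvEmit_append_not_mem _ ps x hm, List.filter_append, hb]
      simp
    · have hxlt : x.1 < k := lt_of_le_of_ne (not_lt.mp hgt) hxk
      have hfilt : ∀ y ∈ ps.filter (fun p => p.1 == k), pvBeforeP x y = false := by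
        intro y hy
        have hy1 : y.1 = k := by simpa using (List.mem_filter.mp hy).2
        simp [pvBeforeP, hy1]; omega
      have hkeys : PySem.List.insertBy pvBeforeK x.1 (k :: ks)
          = k :: PySem.List.insertBy pvBeforeK x.1 ks := by
        rw [pvInsertBy_cons]; simp [pvBeforeK, hgt]
      rw [hkeys]
      show PySem.List.insertBy pvBeforeP x
          (ps.filter (fun p => p.1 == k) ++ pvEmit ks ps) = _
      rw [pvInsertBy_append _ _ _ _ hfilt, ih hp' hm']
      show _ = (ps ++ [x]).filter (fun p => p.1 == k)
          ++ pvEmit (PySem.List.insertBy pvBeforeK x.1 ks) (ps ++ [x])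
      have : (x.1 == k) = false := by simp [hxk]
      simp [List.filter_append, this]

-- descending key list of ps: sorted(distinct keys, reverse=True)
def pvKs (ps : List (Int × String)) : List Int :=
  PySem.List.sorted (PySem.List.dedup (ps.map Prod.fst)) (fun k => k) true

theorem pvKs_pairwise (ps : List (Int × String)) : (pvKs ps).Pairwise (fun a b => b < a) := by
  have h1 := PySem.List.sorted_pairwise_rev (PySem.List.dedup (ps.map Prod.fst)) (fun k => k)
  have h2 : (pvKs ps).Nodup :=
    ((PySem.List.sorted_perm (PySem.List.dedup (ps.map Prod.fst)) (fun k => k) true).nodup_iff).mpr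
      (PySem.List.nodup_dedup _)
  exact (h1.and h2).imp (fun h => lt_of_le_of_ne h.1 (Ne.symm h.2))

theorem pvMem_ks (ps : List (Int × String)) (a : Int) : a ∈ pvKs ps ↔ a ∈ ps.map Prod.fst := by
  rw [pvKs, PySem.List.mem_sorted, PySem.List.mem_dedup]

theorem pvSorted_append_singleton {α κ : Type} [LinearOrder κ] (l : List α) (x : α) (key : α → κ) :
    PySem.List.sorted (l ++ [x]) key true
      = PySem.List.insertBy (fun a b => decide (key b < key a)) x (PySem.List.sorted l key true) := by
  rw [PySem.List.sorted_rev_eq_foldl_insertBy, PySem.List.sorted_rev_eq_foldl_insertBy,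
    List.foldl_append]
  rfl

theorem pvDedup_append_mem {α : Type} [BEq α] [LawfulBEq α] (l : List α) (a : α) (h : a ∈ l) :
    PySem.List.dedup (l ++ [a]) = PySem.List.dedup l := by
  show PySem.Set.ofList (l ++ [a]) = PySem.Set.ofList l
  rw [PySem.Set.ofList, List.foldl_append]
  exact PySem.Set.add_of_mem ((PySem.Set.mem_ofList l a).mpr h)

theorem pvDedup_append_not_mem {α : Type} [BEq α] [LawfulBEq α] (l : List α) (a : α) (h : a ∉ l) :
    PySem.List.dedup (l ++ [a]) = PySem.List.dedup l ++ [a] := by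
  show PySem.Set.ofList (l ++ [a]) = PySem.Set.ofList l ++ [a]
  rw [PySem.Set.ofList, List.foldl_append]
  exact PySem.Set.add_of_not_mem (fun hc => h ((PySem.Set.mem_ofList l a).mp hc))

-- the central invariant: stable descending sort by score = bucket concatenation by descending key
theorem pvMain (ps : List (Int × String)) :
    PySem.List.sorted ps (fun p => p.1) true = pvEmit (pvKs ps) ps := by
  induction ps using List.reverseRecOn with
  | nil => rfl
  | append_singleton ps x ih =>
    rw [pvSorted_append_singleton, ih]
    by_cases hm : x.1 ∈ ps.map Prod.fst
    · have hks : pvKs (ps ++ [x]) = pvKs ps := by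
        unfold pvKs
        rw [List.map_append]
        simp only [List.map_cons, List.map_nil]
        rw [pvDedup_append_mem _ _ hm]
      rw [hks]
      exact pvL2a (pvKs ps) ps x (pvKs_pairwise ps) ((pvMem_ks ps x.1).mpr hm)
    · have hb : ps.filter (fun p => p.1 == x.1) = [] := by
        rw [List.filter_eq_nil_iff]
        intro p hp hc
        exact hm (List.mem_map.mpr ⟨p, hp, by simpa using hc.symm⟩)
      have hks : pvKs (ps ++ [x]) = PySem.List.insertBy pvBeforeK x.1 (pvKs ps) := by
        unfold pvKs
        rw [List.map_append]
        simp only [List.map_cons, List.map_nil]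
        rw [pvDedup_append_not_mem _ _ hm]
        exact pvSorted_append_singleton _ _ _
      rw [hks]
      exact pvL2b (pvKs ps) ps x (pvKs_pairwise ps)
        (fun h => hm ((pvMem_ks ps x.1).mp h)) hb

-- ===== VERDICT (by name: the statement is the Claim_ definition above) =====
theorem prioritize_suggestions_py_spec : Claim_equal_prioritize_suggestions_py := by
  unfold Claim_equal_prioritize_suggestions_py
  intro suggestions context _
  show prioritize_suggestions_py suggestions context = prioritize_suggestions_py_alt suggestions context
  have hA : prioritize_suggestions_py suggestions context
      = (PySem.List.sorted (suggestions.map (fun s => (pvScore s, s))) (fun p => p.1) true).map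
          (fun p => p.2) := by
    show (PySem.List.sorted
        (suggestions.foldl (fun acc s => acc ++ [(pvScore s, s)]) ([] : List (Int × String)))
        (fun p => p.1) true).map (fun p => p.2) = _
    rw [PySem.List.foldl_append_singleton_eq_map, List.nil_append]
  set d := suggestions.foldl
      (fun d s => d.modify (pvScore s) [] (fun b => b ++ [s]))
      (PySem.Dict.empty : PySem.Dict Int (List String)) with hd
  have hB : prioritize_suggestions_py_alt suggestions context
      = (PySem.List.sorted d.keys (fun k => k) true).flatMap (fun k => d.getD k []) := by
    show (PySem.List.sorted d.keys (fun k => k) true).foldl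
        (fun acc sc => acc ++ d.getD sc []) [] = _
    rw [PySem.List.foldl_append_eq_flatMap, List.nil_append]
  have hdm : d = (suggestions.map (fun s => (pvScore s, s))).foldl
      (fun d p => d.modify p.1 [] (fun b => b ++ [p.2])) PySem.Dict.empty := by
    rw [hd]
    exact (List.foldl_map (f := fun s => (pvScore s, s))
      (g := fun (d : PySem.Dict Int (List String)) (p : Int × String) =>
        d.modify p.1 [] (fun b => b ++ [p.2]))
      (l := suggestions) (init := PySem.Dict.empty)).symm
  have hkeys : d.keys = PySem.List.dedup ((suggestions.map (fun s => (pvScore s, s))).map Prod.fst) := by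
    refine (PySem.Dict.keys_foldl_modify_key suggestions pvScore ([] : List String)
        (fun _ s b => b ++ [s]) PySem.Dict.empty).trans ?_
    simp [PySem.List.dedup, PySem.Set.update, PySem.Set.ofList, PySem.Dict.keys_empty,
      PySem.Set.empty, List.map_map, Function.comp_def]
  have hgetD : ∀ k : Int, d.getD k []
      = (((suggestions.map (fun s => (pvScore s, s))).filter (fun p => p.1 == k)).map
          (fun p => p.2)) := by
    intro k
    rw [hdm, PySem.Dict.getD_foldl_modify_append, PySem.Dict.getD_empty, List.nil_append]
  rw [hA, hB, hkeys, pvMain (suggestions.map (fun s => (pvScore s, s)))]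
  unfold pvEmit pvKs
  rw [List.map_flatMap]
  exact List.flatMap_congr (fun k _ => (hgetD k).symm)
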